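-- pv_equiv track=rewrite | github.com/uvsq22101593/l1-python | exercises/TD04_listes/carremagique.py | estNormal
-- ===== SOURCE A (Python) =====
-- def estNormal(carre):
--     all = []
--     for ligne in carre :
--         for elem in ligne :
--             if all.count(elem) > 0:
--                 return False
--             all.append (elem)
--     all.sort(reverse= True)
--
--     taille = len(carre)
--     if all[0] != pow(taille, 2):
--         return False
--     return True
-- ===== SOURCE B (Python) =====
-- def estNormal(carre):
--     flat = sorted(elem for ligne in carre for elem in ligne)
--     for prev, cur in zip(flat, flat[1:]):
--         if prev == cur:
--             return False
--     if flat[-1] != len(carre) ** 2: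
--         return False
--     return True
-- ===== Notes on version B (the rewrite author's own statement) =====
-- stated objective: alternative
-- what changed: Replaces the per-element list.count duplicate check inside the flatten loop with one ascending sort of the flattened square followed by a single adjacent-pair scan, comparing the last (maximal) element to len(carre)**2; A's early exit on the first duplicate makes it quicker on duplicate-heavy inputs, so no speed is claimed.
import Mathlib
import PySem

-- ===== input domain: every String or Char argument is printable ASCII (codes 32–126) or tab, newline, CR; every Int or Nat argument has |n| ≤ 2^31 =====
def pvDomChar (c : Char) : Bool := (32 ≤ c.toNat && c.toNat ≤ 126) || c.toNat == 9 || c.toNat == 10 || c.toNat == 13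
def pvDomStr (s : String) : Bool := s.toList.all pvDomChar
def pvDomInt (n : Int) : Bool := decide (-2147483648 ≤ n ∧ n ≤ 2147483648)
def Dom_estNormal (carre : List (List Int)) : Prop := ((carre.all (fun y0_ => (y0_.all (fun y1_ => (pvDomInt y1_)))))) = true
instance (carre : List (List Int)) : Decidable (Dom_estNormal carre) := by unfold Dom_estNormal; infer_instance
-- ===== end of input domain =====

-- B replaces A's per-element list.count duplicate scan with one ascending sort of the
-- flattened square and a single adjacent-pair scan (objective: alternative algorithm).


-- ===== PORT A =====
-- inner 'for elem in ligne': early return False becomes none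
def pvA_elems (acc : List Int) : List Int → Option (List Int)
  | [] => some acc
  | e :: rest =>
      if PySem.List.count acc e > 0 then none
      else pvA_elems (acc ++ [e]) rest

-- outer 'for ligne in carre'
def pvA_rows (acc : List Int) : List (List Int) → Option (List Int)
  | [] => some acc
  | l :: rest =>
      match pvA_elems acc l with
      | none => none
      | some acc' => pvA_rows acc' rest

def estNormal (carre : List (List Int)) : Bool :=
  match pvA_rows [] carre with
  | none => false
  | some all =>
      let all := PySem.List.sorted all (fun x => x) true
      let taille : Int := carre.length
      match PySem.List.pyGet? all 0 with
      | none => false   -- IndexError in Python; excluded by Pre_estNormal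
      | some h => if h ≠ taille ^ 2 then false else true

-- ===== PORT B =====
def estNormal_alt (carre : List (List Int)) : Bool :=
  let flat := PySem.List.sorted (carre.flatMap (fun ligne => ligne)) (fun x => x) false
  if (flat.zip (PySem.List.slice flat (some 1) none)).any (fun p => decide (p.1 = p.2)) then false
  else
    match PySem.List.pyGet? flat (-1) with
    | none => false   -- IndexError in Python; excluded by Pre_estNormal
    | some m => if m ≠ ((carre.length : Int)) ^ 2 then false else true

-- ===== PRECONDITION & SPEC =====
-- Pre_ excludes only squares whose flattened cell list is empty: there both A and B raise IndexError.
def Pre_estNormal (carre : List (List Int)) : Prop := carre.flatMap (fun l => l) ≠ []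
instance (carre : List (List Int)) : Decidable (Pre_estNormal carre) := by unfold Pre_estNormal; infer_instance
def pvWitness_estNormal : List (List Int) := [[1, 2], [3, 4]]

def Spec_estNormal (carre : List (List Int)) (out : Bool) : Prop := out = estNormal_alt carre
instance (carre : List (List Int)) (out : Bool) : Decidable (Spec_estNormal carre out) := by unfold Spec_estNormal; infer_instance

-- ===== CLAIM (what is proved, stated in full; the proofs are below) =====
def Claim_equal_estNormal : Prop := ∀ (carre : List (List Int)), Dom_estNormal carre → Pre_estNormal carre → Spec_estNormal carre (estNormal carre)

-- ===== LEMMAS AND PROOFS =====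

theorem pvA_elems_eq (l : List Int) : ∀ acc : List Int, acc.Nodup →
    pvA_elems acc l = if (acc ++ l).Nodup then some (acc ++ l) else none := by
  induction l with
  | nil => intro acc h; simp [pvA_elems, h]
  | cons e rest ih =>
      intro acc hacc
      simp only [pvA_elems, PySem.List.count_eq]
      by_cases he : e ∈ acc
      · rw [if_pos (by simpa [List.count_pos_iff] using he)]
        rw [if_neg]
        intro hnd
        exact (List.disjoint_of_nodup_append hnd) he (List.mem_cons_self)
      · have hacc' : (acc ++ [e]).Nodup := by
          rw [List.nodup_append]
          refine ⟨hacc, List.nodup_singleton e, ?_⟩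
          intro a ha b hb h
          rw [List.mem_singleton] at hb
          subst hb; subst h
          exact he ha
        rw [if_neg (by simpa [List.count_pos_iff] using he), ih _ hacc']
        simp [List.append_assoc]

theorem pvA_rows_eq (rows : List (List Int)) : ∀ acc : List Int, acc.Nodup →
    pvA_rows acc rows =
      if (acc ++ rows.flatMap (fun l => l)).Nodup then some (acc ++ rows.flatMap (fun l => l)) else none := by
  induction rows with
  | nil => intro acc h; simp [pvA_rows, h]
  | cons l rest ih =>
      intro acc hacc
      simp only [pvA_rows, pvA_elems_eq _ _ hacc]
      by_cases h : (acc ++ l).Nodup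
      · rw [if_pos h]
        simp only []
        rw [ih _ h]
        simp [List.append_assoc]
      · rw [if_neg h, if_neg]
        intro hnd
        exact h (hnd.sublist (List.append_assoc acc l _ ▸
          List.sublist_append_left (acc ++ l) (rest.flatMap (fun l => l))))

-- adjacent scan on a ≤-sorted list: no equal neighbours means strictly increasing
theorem pairwise_lt_of_adj_false : ∀ l : List Int, l.Pairwise (· ≤ ·) →
    (l.zip l.tail).any (fun p => decide (p.1 = p.2)) = false → l.Pairwise (· < ·) := by
  intro l
  induction l with
  | nil => intro _ _; exact List.Pairwise.nil
  | cons a t ih =>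
      intro hle hadj
      have hle' := List.pairwise_cons.mp hle
      cases t with
      | nil => simp
      | cons b r =>
          simp only [List.tail_cons, List.zip_cons_cons, List.any_cons, Bool.or_eq_false_iff,
            decide_eq_false_iff_not] at hadj
          have htlt : (b :: r).Pairwise (· < ·) := ih hle'.2 (by
            simpa [List.tail_cons] using hadj.2)
          refine List.pairwise_cons.mpr ⟨?_, htlt⟩
          intro x hx
          have hab : a < b := lt_of_le_of_ne (hle'.1 b List.mem_cons_self) hadj.1
          rcases List.mem_cons.mp hx with rfl | hxr
          · exact hab
          · exact lt_trans hab ((List.pairwise_cons.mp htlt).1 x hxr)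

theorem adj_false_of_pairwise_lt : ∀ l : List Int, l.Pairwise (· < ·) →
    (l.zip l.tail).any (fun p => decide (p.1 = p.2)) = false := by
  intro l
  induction l with
  | nil => intro _; rfl
  | cons a t ih =>
      intro hlt
      have hlt' := List.pairwise_cons.mp hlt
      cases t with
      | nil => rfl
      | cons b r =>
          simp only [List.tail_cons, List.zip_cons_cons, List.any_cons, Bool.or_eq_false_iff,
            decide_eq_false_iff_not]
          exact ⟨ne_of_lt (hlt'.1 b List.mem_cons_self), by
            simpa [List.tail_cons] using ih hlt'.2⟩

-- ===== VERDICT (by name: the statement is the Claim_ definition above) =====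
theorem estNormal_spec : Claim_equal_estNormal := by
  intro carre _ _
  unfold Spec_estNormal estNormal estNormal_alt
  rw [pvA_rows_eq _ [] List.nodup_nil]
  simp only [List.nil_append]
  have hperm : (PySem.List.sorted (carre.flatMap (fun ligne => ligne)) (fun x => x) false).Perm
      (carre.flatMap (fun ligne => ligne)) := PySem.List.sorted_perm _ _ _
  have hle : (PySem.List.sorted (carre.flatMap (fun ligne => ligne)) (fun x => x) false).Pairwise
      (· ≤ ·) := by simpa using PySem.List.sorted_pairwise (carre.flatMap (fun ligne => ligne)) (fun x => x)
  by_cases hnd : (carre.flatMap (fun l => l)).Nodup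
  · rw [if_pos hnd]
    have hndasc : (PySem.List.sorted (carre.flatMap (fun ligne => ligne)) (fun x => x) false).Nodup :=
      hperm.nodup_iff.mpr hnd
    have hlt : (PySem.List.sorted (carre.flatMap (fun ligne => ligne)) (fun x => x) false).Pairwise
        (· < ·) := (hle.and hndasc).imp (fun h => lt_of_le_of_ne h.1 h.2)
    rw [PySem.List.slice_from_one, adj_false_of_pairwise_lt _ hlt]
    have hdesc : PySem.List.sorted (carre.flatMap (fun l => l)) (fun x => x) true =
        (PySem.List.sorted (carre.flatMap (fun ligne => ligne)) (fun x => x) false).reverse := by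
      apply PySem.List.sorted_rev_eq_of_perm_of_pairwise_gt
      · exact (List.reverse_perm _).trans hperm
      · simpa [List.pairwise_reverse] using hlt
    simp only [hdesc, PySem.List.pyGet?_zero, PySem.List.pyGet?_neg_one,
      ← List.head?_reverse, List.head?_eq_getElem?]
    simp
  · rw [if_neg hnd]
    have : (((PySem.List.sorted (carre.flatMap (fun ligne => ligne)) (fun x => x) false).zip
        (PySem.List.slice (PySem.List.sorted (carre.flatMap (fun ligne => ligne)) (fun x => x) false)
          (some 1) none)).any (fun p => decide (p.1 = p.2))) = true := by
      rw [PySem.List.slice_from_one]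
      by_contra h
      exact hnd (hperm.nodup_iff.mp
        ((pairwise_lt_of_adj_false _ hle (Bool.not_eq_true _ ▸ eq_false_of_ne_true h)).nodup))
    rw [this]
    simp
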